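-- pv_equiv track=rewrite | github.com/mrsuit0114/algorithmprac | programmers/202304/level3/숫자게임.py | solution
-- ===== SOURCE A (Python) =====
-- def solution(A, B):
--     answer = 0
--     A.sort()
--     B.sort()
--     bp = 0
--     for a in A:
--         while B[bp]<=a:
--             bp+=1
--             if bp==len(B):
--                 return answer
--         answer+=1
--         bp+=1
--         if bp == len(B):
--             return answer
--
--
--     return answer
-- ===== SOURCE B (Python) =====
-- def solution(A, B):
--     # Descending two-pointer greedy: match the largest remaining B against each A
--     # taken from largest to smallest.  Like A, sorts both arguments in place.
--     A.sort()
--     B.sort()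
--     bs = B[::-1]  # descending
--     answer = 0
--     for a in reversed(A):
--         if answer < len(bs) and bs[answer] > a:
--             answer += 1
--     return answer
-- ===== Notes on version B (the rewrite author's own statement) =====
-- stated objective: alternative
-- what changed: A scans sorted B ascending with a skip pointer, picking for each ascending A element the smallest remaining B element that beats it (with early returns when B is exhausted); B instead walks both sorted lists descending, using the answer itself as the pointer into B reversed, matching the largest remaining B element against each A element from largest to smallest.
-- crash fix: When B is empty and A is nonempty, A raises IndexError on B[bp]; B's descending pointer never indexes B and returns 0. — e.g. on solution([1], []): A raises IndexError, B returns 0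
import Mathlib
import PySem

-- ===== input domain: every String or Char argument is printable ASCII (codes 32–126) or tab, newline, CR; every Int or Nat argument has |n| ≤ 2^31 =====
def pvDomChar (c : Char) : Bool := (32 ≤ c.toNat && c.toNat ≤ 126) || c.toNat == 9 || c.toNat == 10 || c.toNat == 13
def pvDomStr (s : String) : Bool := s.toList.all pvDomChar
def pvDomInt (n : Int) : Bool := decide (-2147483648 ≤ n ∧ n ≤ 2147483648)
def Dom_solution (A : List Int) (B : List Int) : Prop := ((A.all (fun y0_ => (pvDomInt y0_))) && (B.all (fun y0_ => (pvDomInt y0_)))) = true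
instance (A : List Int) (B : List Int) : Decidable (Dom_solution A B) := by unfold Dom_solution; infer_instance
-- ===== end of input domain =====

-- B matches the largest remaining B-element against each A-element taken descending, instead of
-- A's ascending scan with a skip pointer; same return value. Both Pythons sort A and B in place;
-- the equivalence proved here is about the return value.

-- ===== PORT A =====
-- the inner `while B[bp] <= a: ...` loop; fuel = B.length - bp; `none` means the function
-- returns the current answer (bp reached len(B); fuel 0 is reached only when B = [], where
-- Python raises IndexError — excluded by Pre_solution)
def solWhile (b : List Int) (x : Int) : Nat → Nat → Option Nat
  | 0, _ => none
  | fuel + 1, bp =>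
    if b.getD bp 0 ≤ x then
      (if bp + 1 = b.length then none else solWhile b x fuel (bp + 1))
    else some bp

-- the outer `for a in A` loop with state (bp, answer) and early returns
def solLoop (b : List Int) : List Int → Nat → Int → Int
  | [], _, ans => ans
  | x :: rest, bp, ans =>
    match solWhile b x (b.length - bp) bp with
    | none => ans
    | some bp' => if bp' + 1 = b.length then ans + 1 else solLoop b rest (bp' + 1) (ans + 1)

def solution (A : List Int) (B : List Int) : Int :=
  solLoop (PySem.List.sorted B (fun y => y) false) (PySem.List.sorted A (fun y => y) false) 0 0

-- ===== PORT B =====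
-- loop body: `if answer < len(bs) and bs[answer] > a: answer += 1`
def bStep (bs : List Int) (ans : Nat) (a : Int) : Nat :=
  if ans < bs.length ∧ a < bs.getD ans 0 then ans + 1 else ans

def solution_alt (A : List Int) (B : List Int) : Int :=
  -- bs = B[::-1] after B.sort(); answer = fold of the loop body over reversed(A)
  ((((PySem.List.sorted A (fun y => y) false).reverse).foldl
      (bStep ((PySem.List.sorted B (fun y => y) false).reverse)) 0 : Nat) : Int)

-- ===== PRECONDITION & SPEC =====
-- Pre_ excludes exactly the inputs where Python A raises IndexError: empty B with nonempty A.
def Pre_solution (A : List Int) (B : List Int) : Prop := B ≠ [] ∨ A = []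
instance (A : List Int) (B : List Int) : Decidable (Pre_solution A B) := by unfold Pre_solution; infer_instance
def pvWitness_solution : List Int × List Int := ([1, 3], [2, 2])

-- When B is empty and A is nonempty, A raises IndexError on B[bp]; B returns 0.
def Raises_solution (A : List Int) (B : List Int) : Prop := B = [] ∧ A ≠ []
instance (A : List Int) (B : List Int) : Decidable (Raises_solution A B) := by unfold Raises_solution; infer_instance
def pvRaiseWitness_solution : List Int × List Int := ([1], [])
def pvRaiseWitnessOut_solution : Int := 0

def Spec_solution (A : List Int) (B : List Int) (out : Int) : Prop := out = solution_alt A B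
instance (A : List Int) (B : List Int) (out : Int) : Decidable (Spec_solution A B out) := by unfold Spec_solution; infer_instance

-- ===== CLAIM (what is proved, stated in full; the proofs are below) =====
def Claim_equal_solution : Prop := ∀ (A : List Int) (B : List Int), Dom_solution A B → Pre_solution A B → Spec_solution A B (solution A B)
def Claim_raises_solution : Prop := (∀ (A : List Int) (B : List Int), Dom_solution A B → Raises_solution A B → ¬ Pre_solution A B) ∧ (Dom_solution (pvRaiseWitness_solution.1) (pvRaiseWitness_solution.2) ∧ Raises_solution (pvRaiseWitness_solution.1) (pvRaiseWitness_solution.2) ∧ solution_alt (pvRaiseWitness_solution.1) (pvRaiseWitness_solution.2) = pvRaiseWitnessOut_solution)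

-- ===== LEMMAS AND PROOFS =====

-- A's greedy as a clean front-peeling recursion on the two ascending lists
def ascN : List Int → List Int → Nat
  | _, [] => 0
  | [], _ => 0
  | x :: xs, y :: ys => if y ≤ x then ascN (x :: xs) ys else 1 + ascN xs ys
termination_by a b => a.length + b.length

-- B's greedy as a front-peeling recursion on the two DESCENDING lists
def descN : List Int → List Int → Nat
  | [], _ => 0
  | _, [] => 0
  | x :: xs, y :: ys => if x < y then 1 + descN xs ys else descN xs (y :: ys)

lemma ascN_cons (x y : Int) (xs ys : List Int) :
    ascN (x :: xs) (y :: ys) = if y ≤ x then ascN (x :: xs) ys else 1 + ascN xs ys := by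
  simp [ascN]

lemma descN_cons (x y : Int) (xs ys : List Int) :
    descN (x :: xs) (y :: ys) = if x < y then 1 + descN xs ys else descN xs (y :: ys) := by
  simp [descN]

@[simp] lemma ascN_nil_left (ys : List Int) : ascN [] ys = 0 := by cases ys <;> simp [ascN]
@[simp] lemma ascN_nil_right (xs : List Int) : ascN xs [] = 0 := by cases xs <;> simp [ascN]
@[simp] lemma descN_nil_left (ys : List Int) : descN [] ys = 0 := by cases ys <;> simp [descN]
@[simp] lemma descN_nil_right (xs : List Int) : descN xs [] = 0 := by cases xs <;> simp [descN]

lemma solLoop_eq_ascN (b : List Int) :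
    ∀ (l : List Int) (bp : Nat) (ans : Int), bp ≤ b.length →
      solLoop b l bp ans = ans + (ascN l (b.drop bp) : Int) := by
  intro l
  induction l with
  | nil => intro bp ans _; simp [solLoop]
  | cons x xs ih =>
    intro bp ans hle
    have inner : ∀ (k bp : Nat) (ans : Int), bp ≤ b.length → b.length - bp = k →
        solLoop b (x :: xs) bp ans = ans + (ascN (x :: xs) (b.drop bp) : Int) := by
      intro k
      induction k with
      | zero =>
        intro bp ans hle h0
        have hbp : bp = b.length := by omega
        have hdrop : b.drop bp = [] := by simp [hbp]
        simp [solLoop, h0, solWhile, hdrop]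
      | succ k ihk =>
        intro bp ans hle hk
        have hlt : bp < b.length := by omega
        have hdrop : b.drop bp = b[bp] :: b.drop (bp + 1) := List.drop_eq_getElem_cons hlt
        have hget : b[bp]?.getD 0 = b[bp] := by simp [List.getElem?_eq_getElem hlt]
        by_cases hyx : b[bp] ≤ x
        · by_cases hend : bp + 1 = b.length
          · have hdrop1 : b.drop (bp + 1) = [] := by simp [hend]
            rw [hdrop, hdrop1]
            simp [solLoop, hk, solWhile, hget, hyx, hend, ascN]
          · have hstep : solLoop b (x :: xs) bp ans = solLoop b (x :: xs) (bp + 1) ans := by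
              have hk1 : b.length - (bp + 1) = k := by omega
              simp [solLoop, hk, hk1, solWhile, hget, hyx, hend]
            rw [hstep, ihk (bp + 1) ans (by omega) (by omega), hdrop]
            rw [ascN_cons, if_pos hyx]
        · have hwhile : solWhile b x (b.length - bp) bp = some bp := by
            rw [hk]; simp [solWhile, hget, hyx]
          have hstep2 : ascN (x :: xs) (b[bp] :: b.drop (bp + 1)) = 1 + ascN xs (b.drop (bp + 1)) := by
            rw [ascN_cons, if_neg hyx]
          by_cases hend : bp + 1 = b.length
          · have hdrop1 : b.drop (bp + 1) = [] := by simp [hend]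
            rw [hdrop, hstep2, hdrop1]
            simp [solLoop, hwhile, hend]
          · rw [show solLoop b (x :: xs) bp ans
                  = solLoop b xs (bp + 1) (ans + 1) by simp [solLoop, hwhile, hend]]
            rw [ih (bp + 1) (ans + 1) (by omega), hdrop, hstep2]
            push_cast
            ring
    exact inner (b.length - bp) bp ans hle rfl

lemma foldl_bStep_eq_descN (bs : List Int) :
    ∀ (l : List Int) (j : Nat), l.foldl (bStep bs) j = j + descN l (bs.drop j) := by
  intro l
  induction l with
  | nil => intro j; rw [List.foldl_nil, descN_nil_left]; omega
  | cons x xs ih =>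
    intro j
    cases hdrop : bs.drop j with
    | nil =>
      have hge : bs.length ≤ j := by
        by_contra h
        rw [List.drop_eq_getElem_cons (by omega : j < bs.length)] at hdrop
        exact List.cons_ne_nil _ _ hdrop
      have hstep : bStep bs j x = j := by simp [bStep]; omega
      simp [List.foldl_cons, hstep, ih j, hdrop]
    | cons y ys =>
      have hlt : j < bs.length := by
        by_contra h
        simp [List.drop_eq_nil_of_le (by omega : bs.length ≤ j)] at hdrop
      have hcons : bs.drop j = bs[j] :: bs.drop (j + 1) := List.drop_eq_getElem_cons hlt
      have hy : bs[j] = y := by rw [hdrop] at hcons; exact ((List.cons.injEq _ _ _ _).mp hcons.symm).1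
      have hys : bs.drop (j + 1) = ys := by rw [hdrop] at hcons; exact ((List.cons.injEq _ _ _ _).mp hcons.symm).2
      have hget : bs[j]?.getD 0 = y := by simp [List.getElem?_eq_getElem hlt, hy]
      by_cases hxy : x < y
      · have hstep : bStep bs j x = j + 1 := by
          unfold bStep; rw [if_pos]; exact ⟨hlt, by simpa [List.getD_eq_getElem?_getD, hget] using hxy⟩
        rw [List.foldl_cons, hstep, ih (j + 1), hys, descN_cons, if_pos hxy]
        omega
      · have hstep : bStep bs j x = j := by
          unfold bStep; rw [if_neg]; rintro ⟨-, hgt⟩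
          exact hxy (by simpa [List.getD_eq_getElem?_getD, hget] using hgt)
        rw [List.foldl_cons, hstep, ih j, hdrop, descN_cons, if_neg hxy]

-- dropping the SMALLEST b-element (appended at the back of the descending list) changes nothing
-- when it beats no a-element
lemma descN_drop_last (y : Int) :
    ∀ (p q : List Int), (∀ u ∈ p, y ≤ u) → descN p (q ++ [y]) = descN p q := by
  intro p
  induction p with
  | nil => intro q _; simp
  | cons u p' ih =>
    intro q hy
    have hyu : y ≤ u := hy u (by simp)
    cases q with
    | nil =>
      have : descN (u :: p') [y] = descN p' [y] := by
        simp [descN]; omega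
      rw [List.nil_append, this,
        show descN p' [y] = descN p' ([] ++ [y]) by simp,
        ih [] (fun v hv => hy v (by simp [hv]))]
      simp
    | cons z zs =>
      by_cases hzu : u < z
      · simp [descN, hzu, ih (zs) (fun v hv => hy v (by simp [hv]))]
      · simp [descN, hzu]
        exact ih (z :: zs) (fun v hv => hy v (by simp [hv]))

-- pairing the smallest a (x, at the back) with the smallest b (y, at the back) when y beats x
lemma descN_pair_last :
    ∀ (p q : List Int) (x y : Int), x < y → (∀ u ∈ p, x ≤ u) → (∀ v ∈ q, y ≤ v) →
      descN (p ++ [x]) (q ++ [y]) = 1 + descN p q := by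
  intro p
  induction p with
  | nil =>
    intro q x y hxy _ hq
    cases q with
    | nil => simp [descN, hxy]
    | cons z zs =>
      have hz : x < z := lt_of_lt_of_le hxy (hq z (by simp))
      simp [descN, hz]
  | cons u p' ih =>
    intro q x y hxy hp hq
    have hxu : x ≤ u := hp u (by simp)
    have hp' : ∀ v ∈ p', x ≤ v := fun v hv => hp v (by simp [hv])
    cases q with
    | nil =>
      by_cases hyu : u < y
      · simp [descN, hyu]
      · have : descN ((u :: p') ++ [x]) ([] ++ [y]) = descN (p' ++ [x]) ([] ++ [y]) := by
          simp [descN, hyu]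
        rw [this, ih [] x y hxy hp' (by simp)]
        simp
    | cons z zs =>
      have hzs : ∀ v ∈ zs, y ≤ v := fun v hv => hq v (by simp [hv])
      by_cases hzu : u < z
      · have l1 : descN ((u :: p') ++ [x]) ((z :: zs) ++ [y]) = 1 + descN (p' ++ [x]) (zs ++ [y]) := by
          simp [descN, hzu]
        rw [l1, ih zs x y hxy hp' hzs]
        simp [descN, hzu]
      · have l1 : descN ((u :: p') ++ [x]) ((z :: zs) ++ [y]) = descN (p' ++ [x]) ((z :: zs) ++ [y]) := by
          simp [descN, hzu]
        rw [l1, ih (z :: zs) x y hxy hp' hq]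
        simp [descN, hzu]

-- the main exchange lemma: the ascending skip-pointer greedy and the descending greedy agree
-- on sorted input
lemma ascN_eq_descN_reverse :
    ∀ (b a : List Int), a.Pairwise (· ≤ ·) → b.Pairwise (· ≤ ·) →
      ascN a b = descN a.reverse b.reverse := by
  intro b
  induction b with
  | nil => intro a _ _; simp
  | cons b0 bs ih =>
    intro a ha hb
    have hb0 : ∀ v ∈ bs, b0 ≤ v := (List.pairwise_cons.mp hb).1
    have hbs : bs.Pairwise (· ≤ ·) := (List.pairwise_cons.mp hb).2
    cases a with
    | nil => simp
    | cons a0 as =>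
      have ha0 : ∀ u ∈ as, a0 ≤ u := (List.pairwise_cons.mp ha).1
      have has : as.Pairwise (· ≤ ·) := (List.pairwise_cons.mp ha).2
      by_cases h : b0 ≤ a0
      · have l1 : ascN (a0 :: as) (b0 :: bs) = ascN (a0 :: as) bs := by simp [ascN, h]
        rw [l1, ih (a0 :: as) ha hbs]
        have hall : ∀ u ∈ (a0 :: as).reverse, b0 ≤ u := by
          intro u hu
          rcases List.mem_reverse.mp hu with hu
          rcases List.mem_cons.mp hu with rfl | hu
          · exact h
          · exact le_trans h (ha0 u hu)
        rw [show (b0 :: bs).reverse = bs.reverse ++ [b0] by simp,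
          descN_drop_last b0 (a0 :: as).reverse bs.reverse hall]
      · have hlt : a0 < b0 := by omega
        have l1 : ascN (a0 :: as) (b0 :: bs) = 1 + ascN as bs := by simp [ascN, h]
        rw [l1, ih as has hbs,
          show (a0 :: as).reverse = as.reverse ++ [a0] by simp,
          show (b0 :: bs).reverse = bs.reverse ++ [b0] by simp,
          descN_pair_last as.reverse bs.reverse a0 b0 hlt
            (fun u hu => ha0 u (List.mem_reverse.mp hu))
            (fun v hv => hb0 v (List.mem_reverse.mp hv))]

-- ===== VERDICT (by name: the statement is the Claim_ definition above) =====
theorem solution_spec : Claim_equal_solution := by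
  intro A B _ _
  unfold Spec_solution solution solution_alt
  rw [solLoop_eq_ascN _ _ 0 0 (by omega),
    foldl_bStep_eq_descN _ _ 0]
  simp [ascN_eq_descN_reverse (PySem.List.sorted B (fun y => y) false)
    (PySem.List.sorted A (fun y => y) false)
    (PySem.List.sorted_pairwise A (fun y => y))
    (PySem.List.sorted_pairwise B (fun y => y))]

@[simp] theorem solution_raises : Claim_raises_solution := by
  unfold Claim_raises_solution
  constructor
  · intro A B _ hr hpre
    rcases hr with ⟨hB, hA⟩
    rcases hpre with h | h
    · exact h hB
    · exact hA h
  · exact ⟨by decide, by decide, by decide⟩
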